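-- pv_equiv track=rewrite | github.com/yongmin01/Algorithm | Programmers/합승 택시 요금.py | solution
-- ===== SOURCE A (Python) =====
-- import heapq
--
-- def solution(n, s, a, b, fares):
--     answer = int(2e9)
--
--     graph = [[] for _ in range(n+1)]
--     for v1, v2, w in fares :
--         graph[v1].append([w, v2])
--         graph[v2].append([w, v1])
--     def dijikstra(s) :
--         pq = []
--         visited = [False for _ in range(n+1)]
--         distance = [int(2e9) for _ in range(n+1)]
--         distance[s] = 0
--         visited[s] = True
--         heapq.heappush(pq, (0, s))
--
--         while pq :
--             weight, curr = heapq.heappop(pq)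
--             if distance[curr] < weight : continue
--             for w, v in graph[curr] :
--                 if weight + w < distance[v] :
--                     heapq.heappush(pq, (weight+w, v))
--                     distance[v] = weight + w
--         return distance
--
--     ds = dijikstra(s)
--     da = dijikstra(a)
--     db = dijikstra(b)
--
--     for i in range(n+1) :
--         answer = min(answer, ds[i]+da[i]+db[i])
--     return answer
-- ===== SOURCE B (Python) =====
-- # Bellman-Ford-style relaxation to a fixpoint instead of three heap Dijkstras.
-- def solution(n, s, a, b, fares):
--     INF = int(2e9)
--     edges = []
--     for v1, v2, w in fares:
--         edges.append((v1, v2, w))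
--         edges.append((v2, v1, w))
--
--     def relax_all(src):
--         dist = [INF] * (n + 1)
--         dist[src] = 0
--         changed = True
--         while changed:
--             changed = False
--             for u, v, w in edges:
--                 if dist[u] + w < dist[v]:
--                     dist[v] = dist[u] + w
--                     changed = True
--         return dist
--
--     ds = relax_all(s)
--     da = relax_all(a)
--     db = relax_all(b)
--     return min([INF] + [ds[i] + da[i] + db[i] for i in range(n + 1)])
-- ===== Notes on version B (the rewrite author's own statement) =====
-- stated objective: alternative
-- what changed: Replaces the three heap-based lazy Dijkstra runs with Bellman-Ford-style relaxation: a symmetric edge list is swept repeatedly until a full sweep changes no distance, for each of the three sources, then the same min formula is applied.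
-- outside the precondition, e.g. on solution(3, 0, 0, 0, [(2, 3, -5)]): A returns 0, B does not finish within the time limit
import Mathlib
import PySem

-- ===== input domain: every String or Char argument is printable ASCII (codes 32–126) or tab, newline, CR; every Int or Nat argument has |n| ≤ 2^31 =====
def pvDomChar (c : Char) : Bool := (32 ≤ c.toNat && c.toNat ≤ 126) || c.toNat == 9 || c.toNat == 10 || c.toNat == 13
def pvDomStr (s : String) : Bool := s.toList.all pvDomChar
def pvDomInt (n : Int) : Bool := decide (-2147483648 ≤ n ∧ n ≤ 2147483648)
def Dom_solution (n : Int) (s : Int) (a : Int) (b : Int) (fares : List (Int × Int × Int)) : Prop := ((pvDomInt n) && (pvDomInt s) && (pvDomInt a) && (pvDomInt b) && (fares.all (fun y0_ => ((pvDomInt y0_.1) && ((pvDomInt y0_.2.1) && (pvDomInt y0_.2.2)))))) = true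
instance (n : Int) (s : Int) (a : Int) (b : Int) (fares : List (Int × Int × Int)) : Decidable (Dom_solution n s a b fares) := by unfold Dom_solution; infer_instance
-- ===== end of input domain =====

-- B replaces the three heap Dijkstras by Bellman–Ford-style relaxation of the edge list to a
-- fixpoint (objective: alternative algorithm, similar cost); return values agree on Pre_solution.

-- ===== PORT A =====
-- Python list indexing on the length-(n+1) vertex lists is ported by pvVIdx (negative-index
-- wraparound), exact for ids in [-(n+1), n], which Pre_solution guarantees.  The while-loop
-- gets a fuel parameter (proved sufficient below); heapq.heappop is ported as "remove the
-- lexicographically least (weight, vertex) pair", which is the value heappop returns.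
def pvINF : Int := 2000000000

def pvVIdx (n v : Int) : Nat := (if v < 0 then v + (n+1) else v).toNat

def pvAdjAppend (g : List (List (Int × Int))) (i : Nat) (x : Int × Int) : List (List (Int × Int)) :=
  g.set i ((g.getD i []) ++ [x])

def pvBuildGraph (n : Int) (fares : List (Int × Int × Int)) : List (List (Int × Int)) :=
  fares.foldl
    (fun g f => pvAdjAppend (pvAdjAppend g (pvVIdx n f.1) (f.2.2, f.2.1)) (pvVIdx n f.2.1) (f.2.2, f.1))
    (List.replicate (n+1).toNat [])

def pvPairLe (x y : Int × Int) : Bool := decide (x.1 < y.1 ∨ (x.1 = y.1 ∧ x.2 ≤ y.2))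

def pvHeapMin (p : Int × Int) (pq : List (Int × Int)) : Int × Int :=
  pq.foldl (fun m q => if pvPairLe m q then m else q) p

def pvDkStep (n weight : Int) (st : List (Int × Int) × List Int) (e : Int × Int) :
    List (Int × Int) × List Int :=
  if weight + e.1 < st.2.getD (pvVIdx n e.2) 0 then
    ((weight + e.1, e.2) :: st.1, st.2.set (pvVIdx n e.2) (weight + e.1))
  else st

def pvDijkLoop (n : Int) (g : List (List (Int × Int))) :
    Nat → List (Int × Int) → List Int → List Int
  | 0, _, dist => dist
  | fuel+1, pq, dist =>
    match pq with
    | [] => dist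
    | x :: xs =>
      let m := pvHeapMin x xs
      let rest := (x :: xs).erase m
      if dist.getD (pvVIdx n m.2) 0 < m.1 then pvDijkLoop n g fuel rest dist
      else
        let st := (g.getD (pvVIdx n m.2) []).foldl (pvDkStep n m.1) (rest, dist)
        pvDijkLoop n g fuel st.1 st.2

def pvDijkstra (g : List (List (Int × Int))) (fuel : Nat) (n src : Int) : List Int :=
  pvDijkLoop n g fuel [(0, src)] ((List.replicate (n+1).toNat pvINF).set (pvVIdx n src) 0)

def solution (n : Int) (s : Int) (a : Int) (b : Int) (fares : List (Int × Int × Int)) : Int :=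
  let g := pvBuildGraph n fares
  let fuel := (n+1).toNat * 2000000000 * (2 * fares.length + 1) + 2
  let ds := pvDijkstra g fuel n s
  let da := pvDijkstra g fuel n a
  let db := pvDijkstra g fuel n b
  (List.range (n+1).toNat).foldl (fun acc i => min acc (ds.getD i 0 + da.getD i 0 + db.getD i 0)) pvINF

-- ===== PORT B =====
-- Bellman–Ford-style: symmetric edge list, then relax every edge repeatedly until a full sweep
-- changes nothing (fuel proved sufficient below); finally the same min formula.  List indexing
-- is pvVIdx again (Python wraparound, exact on Pre_solution's id range).
def pvEdges (fares : List (Int × Int × Int)) : List (Int × Int × Int) :=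
  fares.foldl (fun es f => es ++ [(f.1, f.2.1, f.2.2), (f.2.1, f.1, f.2.2)]) []

def pvBFStep (n : Int) (st : List Int × Bool) (e : Int × Int × Int) : List Int × Bool :=
  if st.1.getD (pvVIdx n e.1) 0 + e.2.2 < st.1.getD (pvVIdx n e.2.1) 0 then
    (st.1.set (pvVIdx n e.2.1) (st.1.getD (pvVIdx n e.1) 0 + e.2.2), true)
  else st

def pvRelaxRound (n : Int) (es : List (Int × Int × Int)) (dist : List Int) : List Int × Bool :=
  es.foldl (pvBFStep n) (dist, false)

def pvBFLoop (n : Int) (es : List (Int × Int × Int)) : Nat → List Int → List Int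
  | 0, dist => dist
  | fuel+1, dist =>
    let st := pvRelaxRound n es dist
    if st.2 then pvBFLoop n es fuel st.1 else st.1

def pvRelaxAll (es : List (Int × Int × Int)) (fuel : Nat) (n src : Int) : List Int :=
  pvBFLoop n es fuel ((List.replicate (n+1).toNat pvINF).set (pvVIdx n src) 0)

def solution_alt (n : Int) (s : Int) (a : Int) (b : Int) (fares : List (Int × Int × Int)) : Int :=
  let es := pvEdges fares
  let fuel := (n+1).toNat * 2000000000 + 1
  let ds := pvRelaxAll es fuel n s
  let da := pvRelaxAll es fuel n a
  let db := pvRelaxAll es fuel n b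
  ((List.range (n+1).toNat).map (fun i => ds.getD i 0 + da.getD i 0 + db.getD i 0)).foldl min pvINF

-- ===== PRECONDITION & SPEC =====
-- Pre_solution excludes (a) vertex ids outside [-(n+1), n] and n < 0, where A raises
-- IndexError, and (b) negative fare weights, where A's Dijkstra (and B's relaxation) can loop
-- forever on a reachable negative edge; the negative-weight inputs on which A does return
-- (negative edges unreachable from all three sources) are excluded with them, because
-- reachability is not a simple shape of the input.
def Pre_solution (n : Int) (s : Int) (a : Int) (b : Int) (fares : List (Int × Int × Int)) : Prop :=
  0 ≤ n ∧ -(n+1) ≤ s ∧ s ≤ n ∧ -(n+1) ≤ a ∧ a ≤ n ∧ -(n+1) ≤ b ∧ b ≤ n ∧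
  ∀ f ∈ fares, -(n+1) ≤ f.1 ∧ f.1 ≤ n ∧ -(n+1) ≤ f.2.1 ∧ f.2.1 ≤ n ∧ 0 ≤ f.2.2
instance (n : Int) (s : Int) (a : Int) (b : Int) (fares : List (Int × Int × Int)) : Decidable (Pre_solution n s a b fares) := by unfold Pre_solution; infer_instance

def pvWitness_solution : Int × Int × Int × Int × (List (Int × Int × Int)) :=
  (4, 0, 1, 2, [(0, 1, 10), (1, 2, 5), (2, 3, 1), (3, 4, 2)])

def Spec_solution (n : Int) (s : Int) (a : Int) (b : Int) (fares : List (Int × Int × Int)) (out : Int) : Prop := out = solution_alt n s a b fares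
instance (n : Int) (s : Int) (a : Int) (b : Int) (fares : List (Int × Int × Int)) (out : Int) : Decidable (Spec_solution n s a b fares out) := by unfold Spec_solution; infer_instance

-- ===== CLAIM (what is proved, stated in full; the proofs are below) =====
def Claim_equal_solution : Prop := ∀ (n : Int) (s : Int) (a : Int) (b : Int) (fares : List (Int × Int × Int)), Dom_solution n s a b fares → Pre_solution n s a b fares → Spec_solution n s a b fares (solution n s a b fares)

-- ===== LEMMAS AND PROOFS =====

theorem pvVIdx_lt (n v : Int) (hn : 0 ≤ n) (h1 : -(n+1) ≤ v) (h2 : v ≤ n) :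
    pvVIdx n v < (n+1).toNat := by
  unfold pvVIdx; split <;> omega

theorem pvVIdx_le (n v : Int) (hn : 0 ≤ n) (h1 : -(n+1) ≤ v) (h2 : v ≤ n) :
    ((pvVIdx n v : Nat) : Int) ≤ n := by
  unfold pvVIdx; split <;> omega

-- getD/set bookkeeping
theorem pvGetD_set_eq {α : Type} {dflt : α} (l : List α) (i : Nat) (x : α) (h : i < l.length) :
    (l.set i x).getD i dflt = x := by
  simp [List.getD_eq_getElem?_getD, h]

theorem pvGetD_set_ne {α : Type} {dflt : α} (l : List α) {i j : Nat} (x : α) (h : i ≠ j) :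
    (l.set i x).getD j dflt = l.getD j dflt := by
  simp [List.getD_eq_getElem?_getD, List.getElem?_set_ne h]

theorem pvGetD_replicate {α : Type} {dflt : α} (k i : Nat) (x : α) (h : i < k) :
    (List.replicate k x).getD i dflt = x := by
  simp [List.getD_eq_getElem?_getD, h]

-- sum of toNat's, the termination measure
def pvSum (l : List Int) : Nat := (l.map Int.toNat).sum

theorem pvSum_set_lt (l : List Int) (i : Nat) (x : Int) (hi : i < l.length)
    (hx : 0 ≤ x) (hlt : x < l.getD i 0) : pvSum (l.set i x) < pvSum l := by
  induction l generalizing i with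
  | nil => simp at hi
  | cons hd tl ih =>
    cases i with
    | zero => simp [pvSum, List.getD] at hlt ⊢; omega
    | succ j =>
      have := ih j (by simpa using hi) (by simpa [List.getD] using hlt)
      simp [pvSum, List.set] at this ⊢; omega

theorem pvSum_le_of_bound (l : List Int) (c : Nat) (h : ∀ y ∈ l, y.toNat ≤ c) :
    pvSum l ≤ l.length * c := by
  induction l with
  | nil => simp [pvSum]
  | cons hd tl ih =>
    have h1 := h hd (by simp)
    have h2 := ih (fun y hy => h y (by simp [hy]))
    simp [pvSum, List.length_cons] at h2 ⊢
    calc hd.toNat + (tl.map Int.toNat).sum ≤ c + tl.length * c := by omega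
    _ = (tl.length + 1) * c := by ring

-- normalised (canonical-id) edges for the specification
def pvNormE (n : Int) (e : Int × Int × Int) : Int × Int × Int :=
  (((pvVIdx n e.1 : Nat) : Int), ((pvVIdx n e.2.1 : Nat) : Int), e.2.2)

-- paths in the (normalised) symmetric edge list
inductive pvPath (es : List (Int × Int × Int)) : Int → Int → Int → Prop
  | nil (v : Int) : pvPath es v v 0
  | cons {u v t w c : Int} : pvPath es u v c → (v, t, w) ∈ es → pvPath es u t (c + w)

-- what both algorithms compute: the unique stable, attainable distance array
def pvInv (n src : Int) (es : List (Int × Int × Int)) (d : List Int) : Prop :=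
  d.length = (n+1).toNat ∧
  d.getD src.toNat 0 = 0 ∧
  (∀ i : Nat, i < d.length → 0 ≤ d.getD i 0 ∧ d.getD i 0 ≤ pvINF) ∧
  (∀ i : Nat, i < d.length → d.getD i 0 = pvINF ∨ pvPath es src (i : Int) (d.getD i 0))

def pvGood (n src : Int) (es : List (Int × Int × Int)) (d : List Int) : Prop :=
  pvInv n src es d ∧ ∀ e ∈ es, d.getD e.2.1.toNat 0 ≤ d.getD e.1.toNat 0 + e.2.2

def pvEsWF (n : Int) (es : List (Int × Int × Int)) : Prop :=
  ∀ e ∈ es, 0 ≤ e.1 ∧ e.1 ≤ n ∧ 0 ≤ e.2.1 ∧ e.2.1 ≤ n ∧ 0 ≤ e.2.2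

theorem pvGood_le_path (n src : Int) (es : List (Int × Int × Int)) (d : List Int)
    (hg : pvGood n src es d) (v c : Int) (hp : pvPath es src v c) :
    d.getD v.toNat 0 ≤ c := by
  induction hp with
  | nil => exact le_of_eq hg.1.2.1
  | cons p e ih =>
    have h2 := hg.2 _ e
    simp only at h2
    omega

theorem pvGood_unique (n src : Int) (es : List (Int × Int × Int)) (d1 d2 : List Int)
    (h1 : pvGood n src es d1) (h2 : pvGood n src es d2) (i : Nat) (hi : i < (n+1).toNat) :
    d1.getD i 0 = d2.getD i 0 := by
  have l1 : i < d1.length := by rw [h1.1.1]; exact hi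
  have l2 : i < d2.length := by rw [h2.1.1]; exact hi
  have key : ∀ (da db : List Int), pvGood n src es da → pvGood n src es db →
      i < da.length → i < db.length → da.getD i 0 ≤ db.getD i 0 := by
    intro da db ha hb la lb
    rcases hb.1.2.2.2 i lb with hINF | hpath
    · rw [hINF]; exact (ha.1.2.2.1 i la).2
    · have := pvGood_le_path n src es da ha _ _ hpath
      simpa using this
  exact le_antisymm (key d1 d2 h1 h2 l1 l2) (key d2 d1 h2 h1 l2 l1)

-- the shared initial distance array
theorem pvInit_inv (n src : Int) (es : List (Int × Int × Int)) (hn : 0 ≤ n)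
    (h0 : 0 ≤ src) (h1 : src ≤ n) :
    pvInv n src es ((List.replicate (n+1).toNat pvINF).set src.toNat 0) := by
  have hs : src.toNat < (n+1).toNat := by omega
  have hlen : ((List.replicate (n+1).toNat pvINF).set src.toNat 0).length = (n+1).toNat := by simp
  refine ⟨hlen, ?_, ?_, ?_⟩
  · exact pvGetD_set_eq _ _ _ (by simpa using hs)
  · intro i hi
    rw [hlen] at hi
    by_cases h : src.toNat = i
    · subst h; rw [pvGetD_set_eq _ _ _ (by simpa using hs)]; norm_num [pvINF]
    · rw [pvGetD_set_ne _ _ h, pvGetD_replicate _ _ _ hi]; norm_num [pvINF]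
  · intro i hi
    rw [hlen] at hi
    by_cases h : src.toNat = i
    · subst h
      right
      rw [pvGetD_set_eq _ _ _ (by simpa using hs), Int.toNat_of_nonneg h0]
      exact pvPath.nil src
    · left; rw [pvGetD_set_ne _ _ h, pvGetD_replicate _ _ _ hi]

theorem pvInit_sum (n src : Int) (hn : 0 ≤ n) (j : Nat) :
    pvSum ((List.replicate (n+1).toNat pvINF).set j 0) ≤ (n+1).toNat * 2000000000 := by
  have hb : ∀ y ∈ (List.replicate (n+1).toNat pvINF).set j 0, y.toNat ≤ 2000000000 := by
    intro y hy
    rcases List.mem_or_eq_of_mem_set hy with h | h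
    · rw [List.eq_of_mem_replicate h]; norm_num [pvINF]
    · subst h; norm_num
  exact le_trans (pvSum_le_of_bound _ _ hb) (by simp)

-- a single relaxation of edge (u,v,w) that fires preserves the invariant and strictly
-- shrinks the measure (shared by both ports)
theorem pvInv_update' (n src : Int) (es : List (Int × Int × Int)) (d : List Int)
    (u v w : Int) (hinv : pvInv n src es d)
    (hu' : u.toNat < d.length) (hv' : v.toNat < d.length) (hv0 : 0 ≤ v) (hw : 0 ≤ w)
    (hmem : (u, v, w) ∈ es) (hpu : pvPath es src u (d.getD u.toNat 0))
    (hlt : d.getD u.toNat 0 + w < d.getD v.toNat 0) :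
    pvInv n src es (d.set v.toNat (d.getD u.toNat 0 + w)) ∧
    pvSum (d.set v.toNat (d.getD u.toNat 0 + w)) < pvSum d := by
  have hub := hinv.2.2.1 u.toNat hu'
  have hvb := hinv.2.2.1 v.toNat hv'
  have hnew0 : 0 ≤ d.getD u.toNat 0 + w := by omega
  have hvs : v.toNat ≠ src.toNat := by
    intro h
    have : d.getD v.toNat 0 = 0 := by rw [h]; exact hinv.2.1
    omega
  refine ⟨⟨by simpa using hinv.1, ?_, ?_, ?_⟩, ?_⟩
  · rw [pvGetD_set_ne _ _ hvs]; exact hinv.2.1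
  · intro i hi
    rw [List.length_set] at hi
    by_cases h : v.toNat = i
    · subst h; rw [pvGetD_set_eq _ _ _ hv']; omega
    · rw [pvGetD_set_ne _ _ h]; exact hinv.2.2.1 i hi
  · intro i hi
    rw [List.length_set] at hi
    by_cases h : v.toNat = i
    · subst h
      right
      rw [pvGetD_set_eq _ _ _ hv', Int.toNat_of_nonneg hv0]
      exact pvPath.cons hpu hmem
    · rw [pvGetD_set_ne _ _ h]; exact hinv.2.2.2 i hi
  · exact pvSum_set_lt d v.toNat _ hv' hnew0 hlt

theorem pvInv_update (n src : Int) (es : List (Int × Int × Int)) (d : List Int)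
    (u v w : Int) (hinv : pvInv n src es d)
    (hu0 : 0 ≤ u) (hu' : u.toNat < d.length) (hv' : v.toNat < d.length) (hv0 : 0 ≤ v)
    (hw : 0 ≤ w) (hmem : (u, v, w) ∈ es)
    (hlt : d.getD u.toNat 0 + w < d.getD v.toNat 0) :
    pvInv n src es (d.set v.toNat (d.getD u.toNat 0 + w)) ∧
    pvSum (d.set v.toNat (d.getD u.toNat 0 + w)) < pvSum d := by
  have hpu : pvPath es src u (d.getD u.toNat 0) := by
    rcases hinv.2.2.2 u.toNat hu' with hINF | hpath
    · exfalso
      have hvb := hinv.2.2.1 v.toNat hv'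
      rw [hINF] at hlt; unfold pvINF at *; omega
    · rwa [Int.toNat_of_nonneg hu0] at hpath
  exact pvInv_update' n src es d u v w hinv hu' hv' hv0 hw hmem hpu hlt

-- ===== B-side: Bellman–Ford =====

def pvRawWF (n : Int) (es : List (Int × Int × Int)) : Prop :=
  ∀ e ∈ es, -(n+1) ≤ e.1 ∧ e.1 ≤ n ∧ -(n+1) ≤ e.2.1 ∧ e.2.1 ≤ n ∧ 0 ≤ e.2.2

theorem pvBF_flag_mono (n : Int) (es : List (Int × Int × Int)) (d : List Int) :
    (es.foldl (pvBFStep n) (d, true)).2 = true := by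
  induction es generalizing d with
  | nil => rfl
  | cons e tl ih =>
    simp only [List.foldl_cons]
    by_cases hc : d.getD (pvVIdx n e.1) 0 + e.2.2 < d.getD (pvVIdx n e.2.1) 0
    · rw [show pvBFStep n (d, true) e =
          (d.set (pvVIdx n e.2.1) (d.getD (pvVIdx n e.1) 0 + e.2.2), true) by
        unfold pvBFStep; rw [if_pos hc]]
      exact ih _
    · rw [show pvBFStep n (d, true) e = (d, true) by unfold pvBFStep; rw [if_neg hc]]
      exact ih d

theorem pvBF_fold (n src : Int) (es0 : List (Int × Int × Int)) (hn : 0 ≤ n) :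
    ∀ (es : List (Int × Int × Int)) (d : List Int) (c : Bool),
      (∀ e ∈ es, pvNormE n e ∈ es0 ∧ -(n+1) ≤ e.1 ∧ e.1 ≤ n ∧ -(n+1) ≤ e.2.1 ∧ e.2.1 ≤ n ∧ 0 ≤ e.2.2) →
      pvInv n src es0 d →
      pvInv n src es0 (es.foldl (pvBFStep n) (d, c)).1 ∧
      pvSum (es.foldl (pvBFStep n) (d, c)).1 ≤ pvSum d ∧
      ((es.foldl (pvBFStep n) (d, c)).2 = true → c = true ∨ pvSum (es.foldl (pvBFStep n) (d, c)).1 < pvSum d) ∧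
      ((es.foldl (pvBFStep n) (d, c)).2 = false →
        (es.foldl (pvBFStep n) (d, c)).1 = d ∧
        ∀ e ∈ es, d.getD (pvVIdx n e.2.1) 0 ≤ d.getD (pvVIdx n e.1) 0 + e.2.2) := by
  intro es
  induction es with
  | nil =>
    intro d c _ hinv
    refine ⟨hinv, le_refl _, ?_, ?_⟩
    · intro h; left; simpa using h
    · intro _; exact ⟨rfl, by simp⟩
  | cons e tl ih =>
    intro d c hwf hinv
    obtain ⟨hes0, h1, h2, h3, h4, h5⟩ := hwf e (List.mem_cons_self ..)
    have hwtl := fun e' he' => hwf e' (List.mem_cons_of_mem _ he')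
    have hu' : pvVIdx n e.1 < d.length := by rw [hinv.1]; exact pvVIdx_lt n e.1 hn h1 h2
    have hv' : pvVIdx n e.2.1 < d.length := by rw [hinv.1]; exact pvVIdx_lt n e.2.1 hn h3 h4
    simp only [List.foldl_cons]
    by_cases hc : d.getD (pvVIdx n e.1) 0 + e.2.2 < d.getD (pvVIdx n e.2.1) 0
    · rw [show pvBFStep n (d, c) e =
          (d.set (pvVIdx n e.2.1) (d.getD (pvVIdx n e.1) 0 + e.2.2), true) by
        unfold pvBFStep; rw [if_pos hc]]
      have hupd := pvInv_update n src es0 d ((pvVIdx n e.1 : Nat) : Int) ((pvVIdx n e.2.1 : Nat) : Int)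
        e.2.2 hinv (Int.natCast_nonneg _) (by simpa using hu') (by simpa using hv')
        (Int.natCast_nonneg _) h5 hes0 (by simpa using hc)
      simp only [Int.toNat_natCast] at hupd
      obtain ⟨hinv1, hsum1⟩ := hupd
      obtain ⟨I1, I2, I3, I4⟩ := ih _ true hwtl hinv1
      refine ⟨I1, le_trans I2 (le_of_lt hsum1), fun _ => Or.inr (lt_of_le_of_lt I2 hsum1),
        fun hf => ?_⟩
      rw [pvBF_flag_mono] at hf
      exact absurd hf (by simp)
    · rw [show pvBFStep n (d, c) e = (d, c) by unfold pvBFStep; rw [if_neg hc]]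
      obtain ⟨I1, I2, I3, I4⟩ := ih d c hwtl hinv
      refine ⟨I1, I2, I3, fun hf => ?_⟩
      obtain ⟨hd, hstab⟩ := I4 hf
      refine ⟨hd, fun e' he' => ?_⟩
      rcases List.mem_cons.mp he' with rfl | h
      · omega
      · exact hstab e' h

theorem pvBFLoop_good (n src : Int) (es : List (Int × Int × Int)) (hn : 0 ≤ n)
    (hwf : pvRawWF n es) :
    ∀ (fuel : Nat) (d : List Int), pvInv n src (es.map (pvNormE n)) d → pvSum d < fuel →
      pvGood n src (es.map (pvNormE n)) (pvBFLoop n es fuel d) := by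
  intro fuel
  induction fuel with
  | zero => intro d _ h; omega
  | succ k ih =>
    intro d hinv hlt
    have hwf' : ∀ e ∈ es, pvNormE n e ∈ es.map (pvNormE n) ∧
        -(n+1) ≤ e.1 ∧ e.1 ≤ n ∧ -(n+1) ≤ e.2.1 ∧ e.2.1 ≤ n ∧ 0 ≤ e.2.2 :=
      fun e he => ⟨List.mem_map_of_mem he, hwf e he⟩
    obtain ⟨I1, I2, I3, I4⟩ := pvBF_fold n src (es.map (pvNormE n)) hn es d false hwf' hinv
    rw [pvBFLoop]
    simp only [pvRelaxRound]
    by_cases hflag : (es.foldl (pvBFStep n) (d, false)).2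
    · rw [if_pos hflag]
      rcases I3 hflag with hc | hlt2
      · exact absurd hc (by simp)
      · exact ih _ I1 (by omega)
    · rw [if_neg hflag]
      obtain ⟨hd, hstab⟩ := I4 (by simpa using hflag)
      rw [hd]
      refine ⟨hinv, ?_⟩
      intro eN heN
      obtain ⟨e, he, rfl⟩ := List.mem_map.mp heN
      have := hstab e he
      simpa [pvNormE] using this

theorem pvRelaxAll_good (n src : Int) (es : List (Int × Int × Int)) (hn : 0 ≤ n)
    (hwf : pvRawWF n es) (h0 : -(n+1) ≤ src) (h1 : src ≤ n) :
    pvGood n ((pvVIdx n src : Nat) : Int) (es.map (pvNormE n))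
      (pvRelaxAll es ((n+1).toNat * 2000000000 + 1) n src) := by
  unfold pvRelaxAll
  have hinit := pvInit_inv n ((pvVIdx n src : Nat) : Int) (es.map (pvNormE n)) hn
    (Int.natCast_nonneg _) (pvVIdx_le n src hn h0 h1)
  rw [Int.toNat_natCast] at hinit
  exact pvBFLoop_good n _ es hn hwf _ _ hinit
    (by have := pvInit_sum n src hn (pvVIdx n src); omega)

-- ===== edge list and graph construction =====

theorem pvEdges_eq_flatMap (fares : List (Int × Int × Int)) :
    pvEdges fares = fares.flatMap (fun f => [(f.1, f.2.1, f.2.2), (f.2.1, f.1, f.2.2)]) := by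
  unfold pvEdges
  rw [PySem.List.foldl_append_eq_flatMap]
  simp

theorem pvEdges_length (fares : List (Int × Int × Int)) :
    (pvEdges fares).length = 2 * fares.length := by
  rw [pvEdges_eq_flatMap]
  induction fares with
  | nil => simp
  | cons f t ih => simp [List.flatMap_cons, ih]; omega

theorem pvEdges_wf (n : Int) (fares : List (Int × Int × Int))
    (hp : ∀ f ∈ fares, -(n+1) ≤ f.1 ∧ f.1 ≤ n ∧ -(n+1) ≤ f.2.1 ∧ f.2.1 ≤ n ∧ 0 ≤ f.2.2) :
    pvRawWF n (pvEdges fares) := by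
  intro e he
  rw [pvEdges_eq_flatMap] at he
  obtain ⟨f, hf, hmem⟩ := List.mem_flatMap.mp he
  obtain ⟨q1, q2, q3, q4, q5⟩ := hp f hf
  rcases List.mem_cons.mp hmem with rfl | hmem
  · exact ⟨q1, q2, q3, q4, q5⟩
  · rcases List.mem_cons.mp hmem with rfl | hmem
    · exact ⟨q3, q4, q1, q2, q5⟩
    · simp at hmem

def pvGLen (g : List (List (Int × Int))) : Nat := (g.map List.length).sum

def pvGWF (n : Int) (es : List (Int × Int × Int)) (g : List (List (Int × Int))) : Prop :=
  g.length = (n+1).toNat ∧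
  (∀ i : Nat, ∀ x ∈ g.getD i [], pvVIdx n x.2 < (n+1).toNat ∧ 0 ≤ x.1 ∧
    ((i : Int), ((pvVIdx n x.2 : Nat) : Int), x.1) ∈ es.map (pvNormE n)) ∧
  (∀ e ∈ es, (e.2.2, e.2.1) ∈ g.getD (pvVIdx n e.1) []) ∧
  pvGLen g ≤ es.length

theorem pvAdjAppend_length (g : List (List (Int × Int))) (i : Nat) (x : Int × Int) :
    (pvAdjAppend g i x).length = g.length := by
  simp [pvAdjAppend]

theorem pvAdjAppend_mem_iff (g : List (List (Int × Int))) (i j : Nat) (x y : Int × Int)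
    (h : i < g.length) :
    y ∈ (pvAdjAppend g i x).getD j [] ↔ (y ∈ g.getD j [] ∨ (j = i ∧ y = x)) := by
  unfold pvAdjAppend
  by_cases hji : j = i
  · subst hji
    rw [pvGetD_set_eq _ _ _ h]
    simp
  · rw [pvGetD_set_ne _ _ (fun hh => hji hh.symm)]
    simp [hji]

theorem pvAdjAppend_mem_mono (g : List (List (Int × Int))) (i j : Nat) (x y : Int × Int)
    (hy : y ∈ g.getD j []) : y ∈ (pvAdjAppend g i x).getD j [] := by
  unfold pvAdjAppend
  by_cases h : i < g.length
  · by_cases hji : j = i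
    · subst hji; rw [pvGetD_set_eq _ _ _ h]; exact List.mem_append_left _ hy
    · rwa [pvGetD_set_ne _ _ (fun hh => hji hh.symm)]
  · rw [List.set_eq_of_length_le (by omega)]
    exact hy

theorem pvAdjAppend_mem_self (g : List (List (Int × Int))) (i : Nat) (x : Int × Int)
    (h : i < g.length) : x ∈ (pvAdjAppend g i x).getD i [] := by
  unfold pvAdjAppend
  rw [pvGetD_set_eq _ _ _ h]
  simp

theorem pvGLen_adjAppend (g : List (List (Int × Int))) (i : Nat) (x : Int × Int) :
    pvGLen (pvAdjAppend g i x) ≤ pvGLen g + 1 := by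
  induction g generalizing i with
  | nil => simp [pvAdjAppend, pvGLen]
  | cons hd tl ih =>
    cases i with
    | zero => simp [pvAdjAppend, pvGLen, List.getD]; omega
    | succ j =>
      have := ih j
      simp only [pvAdjAppend, pvGLen, List.set, List.getD_cons_succ, List.map_cons,
        List.sum_cons] at this ⊢
      omega

theorem pvGLen_getD (g : List (List (Int × Int))) (i : Nat) :
    (g.getD i []).length ≤ pvGLen g := by
  induction g generalizing i with
  | nil => simp [List.getD]
  | cons hd tl ih =>
    cases i with
    | zero => simp [List.getD, pvGLen]
    | succ j =>
      have := ih j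
      simp only [List.getD_cons_succ, pvGLen, List.map_cons, List.sum_cons] at this ⊢
      omega

theorem pvBuildGraph_wf (n : Int) (fares : List (Int × Int × Int)) (hn : 0 ≤ n)
    (hp : ∀ f ∈ fares, -(n+1) ≤ f.1 ∧ f.1 ≤ n ∧ -(n+1) ≤ f.2.1 ∧ f.2.1 ≤ n ∧ 0 ≤ f.2.2) :
    pvGWF n (pvEdges fares) (pvBuildGraph n fares) := by
  induction fares using List.reverseRecOn with
  | nil =>
    refine ⟨by simp [pvBuildGraph], ?_, by simp [pvEdges], ?_⟩
    · intro i x hx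
      exfalso
      have : (List.replicate (n+1).toNat ([] : List (Int × Int))).getD i [] = [] := by
        rcases Nat.lt_or_ge i (n+1).toNat with h | h
        · exact pvGetD_replicate _ _ _ h
        · rw [List.getD_eq_getElem?_getD, List.getElem?_replicate, if_neg (by omega)]
          rfl
      rw [pvBuildGraph] at hx
      simp only [List.foldl_nil] at hx
      rw [this] at hx
      simp at hx
    · simp [pvBuildGraph, pvGLen, pvEdges, List.map_replicate]
  | append_singleton fs f ih =>
    have hpf := hp f (by simp)
    have hpfs : ∀ f' ∈ fs, -(n+1) ≤ f'.1 ∧ f'.1 ≤ n ∧ -(n+1) ≤ f'.2.1 ∧ f'.2.1 ≤ n ∧ 0 ≤ f'.2.2 :=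
      fun f' hf' => hp f' (by simp [hf'])
    obtain ⟨G1, G2, G3, G4⟩ := ih hpfs
    have hg' : pvBuildGraph n (fs ++ [f]) =
        pvAdjAppend (pvAdjAppend (pvBuildGraph n fs) (pvVIdx n f.1) (f.2.2, f.2.1))
          (pvVIdx n f.2.1) (f.2.2, f.1) := by
      unfold pvBuildGraph
      rw [List.foldl_append]
      simp
    have hes' : pvEdges (fs ++ [f]) =
        pvEdges fs ++ [(f.1, f.2.1, f.2.2), (f.2.1, f.1, f.2.2)] := by
      rw [pvEdges_eq_flatMap, pvEdges_eq_flatMap, List.flatMap_append]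
      simp
    have h1 : pvVIdx n f.1 < (pvBuildGraph n fs).length := by
      rw [G1]; exact pvVIdx_lt n f.1 hn hpf.1 hpf.2.1
    have h2 : pvVIdx n f.2.1 <
        (pvAdjAppend (pvBuildGraph n fs) (pvVIdx n f.1) (f.2.2, f.2.1)).length := by
      rw [pvAdjAppend_length, G1]; exact pvVIdx_lt n f.2.1 hn hpf.2.2.1 hpf.2.2.2.1
    rw [hg', hes']
    refine ⟨?_, ?_, ?_, ?_⟩
    · rw [pvAdjAppend_length, pvAdjAppend_length, G1]
    · intro i x hx
      rw [List.map_append]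
      rcases (pvAdjAppend_mem_iff _ _ _ _ _ h2).mp hx with hx | ⟨rfl, rfl⟩
      · rcases (pvAdjAppend_mem_iff _ _ _ _ _ h1).mp hx with hx | ⟨rfl, rfl⟩
        · obtain ⟨q1, q2, q3⟩ := G2 i x hx
          exact ⟨q1, q2, List.mem_append_left _ q3⟩
        · refine ⟨pvVIdx_lt n f.2.1 hn hpf.2.2.1 hpf.2.2.2.1, hpf.2.2.2.2, ?_⟩
          simp [pvNormE]
      · refine ⟨pvVIdx_lt n f.1 hn hpf.1 hpf.2.1, hpf.2.2.2.2, ?_⟩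
        rw [List.mem_append]
        right
        simp [pvNormE]
    · intro e he
      rcases List.mem_append.mp he with he | he
      · exact pvAdjAppend_mem_mono _ _ _ _ _ (pvAdjAppend_mem_mono _ _ _ _ _ (G3 e he))
      · rcases List.mem_cons.mp he with rfl | he
        · exact pvAdjAppend_mem_mono _ _ _ _ _ (pvAdjAppend_mem_self _ _ _ h1)
        · rcases List.mem_cons.mp he with rfl | he
          · exact pvAdjAppend_mem_self _ _ _ h2
          · simp at he
    · have t1 := pvGLen_adjAppend (pvAdjAppend (pvBuildGraph n fs) (pvVIdx n f.1) (f.2.2, f.2.1))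
        (pvVIdx n f.2.1) (f.2.2, f.1)
      have t2 := pvGLen_adjAppend (pvBuildGraph n fs) (pvVIdx n f.1) (f.2.2, f.2.1)
      simp only [List.length_append, List.length_cons, List.length_nil]
      omega

-- ===== A-side: Dijkstra =====

def pvPpq (n src : Int) (es : List (Int × Int × Int)) (p : Int × Int) (d : List Int) : Prop :=
  pvVIdx n p.2 < (n+1).toNat ∧ d.getD (pvVIdx n p.2) 0 ≤ p.1 ∧
  pvPath es src ((pvVIdx n p.2 : Nat) : Int) p.1

def pvInvA (n src : Int) (es : List (Int × Int × Int)) (g : List (List (Int × Int)))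
    (pq : List (Int × Int)) (d : List Int) : Prop :=
  pvInv n src es d ∧
  (∀ p ∈ pq, pvPpq n src es p d) ∧
  (∀ i : Nat, i < d.length →
    (∃ p ∈ pq, pvVIdx n p.2 = i ∧ p.1 = d.getD i 0) ∨
    (∀ x ∈ g.getD i [], d.getD (pvVIdx n x.2) 0 ≤ d.getD i 0 + x.1))

theorem pvHeapMin_mem (p : Int × Int) (pq : List (Int × Int)) :
    pvHeapMin p pq ∈ p :: pq := by
  induction pq generalizing p with
  | nil => simp [pvHeapMin]
  | cons q qs ih =>
    have : pvHeapMin p (q :: qs) = pvHeapMin (if pvPairLe p q then p else q) qs := by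
      simp [pvHeapMin]
    rw [this]
    have h2 := ih (if pvPairLe p q then p else q)
    rcases List.mem_cons.mp h2 with h | h
    · rw [h]
      by_cases hle : pvPairLe p q <;> simp [hle]
    · simp [h]

theorem pvDk_fold (n src curr weight : Int) (es : List (Int × Int × Int)) (hn : 0 ≤ n)
    (hpathw : pvPath es src ((pvVIdx n curr : Nat) : Int) weight) :
    ∀ (adj : List (Int × Int)) (pq0 : List (Int × Int)) (d : List Int),
      (∀ x ∈ adj, pvVIdx n x.2 < (n+1).toNat ∧ 0 ≤ x.1 ∧
        (((pvVIdx n curr : Nat) : Int), ((pvVIdx n x.2 : Nat) : Int), x.1) ∈ es) →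
      pvInv n src es d → pvVIdx n curr < d.length → d.getD (pvVIdx n curr) 0 = weight →
      (∀ p ∈ pq0, pvPpq n src es p d) →
      (pvInv n src es (adj.foldl (pvDkStep n weight) (pq0, d)).2 ∧
       (∀ j : Nat, (adj.foldl (pvDkStep n weight) (pq0, d)).2.getD j 0 ≤ d.getD j 0) ∧
       (adj.foldl (pvDkStep n weight) (pq0, d)).2.getD (pvVIdx n curr) 0 = weight ∧
       (∀ x ∈ adj, (adj.foldl (pvDkStep n weight) (pq0, d)).2.getD (pvVIdx n x.2) 0 ≤ weight + x.1) ∧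
       (∀ p ∈ pq0, p ∈ (adj.foldl (pvDkStep n weight) (pq0, d)).1) ∧
       (∀ p ∈ (adj.foldl (pvDkStep n weight) (pq0, d)).1, pvPpq n src es p (adj.foldl (pvDkStep n weight) (pq0, d)).2) ∧
       (∀ j : Nat, j < d.length →
          (adj.foldl (pvDkStep n weight) (pq0, d)).2.getD j 0 = d.getD j 0 ∨
          ∃ p ∈ (adj.foldl (pvDkStep n weight) (pq0, d)).1, pvVIdx n p.2 = j ∧ p.1 = (adj.foldl (pvDkStep n weight) (pq0, d)).2.getD j 0) ∧
       pvSum (adj.foldl (pvDkStep n weight) (pq0, d)).2 ≤ pvSum d ∧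
       ((adj.foldl (pvDkStep n weight) (pq0, d)) = (pq0, d) ∨ pvSum (adj.foldl (pvDkStep n weight) (pq0, d)).2 < pvSum d) ∧
       (adj.foldl (pvDkStep n weight) (pq0, d)).1.length ≤ pq0.length + adj.length) := by
  intro adj
  induction adj with
  | nil =>
    intro pq0 d _ hinv _ hdc hPpq
    exact ⟨hinv, fun j => le_refl _, hdc, by simp, fun p hp => hp, hPpq,
      fun j hj => Or.inl rfl, le_refl _, Or.inl rfl, by simp⟩
  | cons x tl ih =>
    intro pq0 d hadj hinv hcl hdc hPpq
    obtain ⟨hvn, hw, hmem⟩ := hadj x (List.mem_cons_self ..)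
    have hadjtl := fun y hy => hadj y (List.mem_cons_of_mem _ hy)
    simp only [List.foldl_cons]
    by_cases hc : weight + x.1 < d.getD (pvVIdx n x.2) 0
    · rw [show pvDkStep n weight (pq0, d) x =
          ((weight + x.1, x.2) :: pq0, d.set (pvVIdx n x.2) (weight + x.1)) by
        unfold pvDkStep; rw [if_pos hc]]
      have hv' : pvVIdx n x.2 < d.length := by rw [hinv.1]; exact hvn
      have hupd := pvInv_update' n src es d ((pvVIdx n curr : Nat) : Int) ((pvVIdx n x.2 : Nat) : Int)
        x.1 hinv (by simpa using hcl) (by simpa using hv') (Int.natCast_nonneg _) hw hmem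
        (by rw [Int.toNat_natCast, hdc]; exact hpathw) (by rw [Int.toNat_natCast, Int.toNat_natCast, hdc]; exact hc)
      simp only [Int.toNat_natCast] at hupd
      rw [hdc] at hupd
      obtain ⟨hinv1, hsum1⟩ := hupd
      have hne : pvVIdx n x.2 ≠ pvVIdx n curr := by
        intro h
        rw [h, hdc] at hc
        omega
      have hdc1 : (d.set (pvVIdx n x.2) (weight + x.1)).getD (pvVIdx n curr) 0 = weight := by
        rw [pvGetD_set_ne _ _ hne]; exact hdc
      have hmono : ∀ j : Nat, (d.set (pvVIdx n x.2) (weight + x.1)).getD j 0 ≤ d.getD j 0 := by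
        intro j
        by_cases hj : pvVIdx n x.2 = j
        · subst hj; rw [pvGetD_set_eq _ _ _ hv']; omega
        · rw [pvGetD_set_ne _ _ hj]
      have hset : (d.set (pvVIdx n x.2) (weight + x.1)).getD (pvVIdx n x.2) 0 = weight + x.1 :=
        pvGetD_set_eq _ _ _ hv'
      have hPpq1 : ∀ p ∈ (weight + x.1, x.2) :: pq0,
          pvPpq n src es p (d.set (pvVIdx n x.2) (weight + x.1)) := by
        intro p hp
        rcases List.mem_cons.mp hp with rfl | hp
        · exact ⟨hvn, le_of_eq hset, pvPath.cons hpathw hmem⟩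
        · obtain ⟨q1, q2, q3⟩ := hPpq p hp
          exact ⟨q1, le_trans (hmono (pvVIdx n p.2)) q2, q3⟩
      obtain ⟨I1, I2, I3, I4, I5, I6, I7, I8, I9, I10⟩ :=
        ih ((weight + x.1, x.2) :: pq0) (d.set (pvVIdx n x.2) (weight + x.1)) hadjtl hinv1
          (by rw [List.length_set]; exact hcl) hdc1 hPpq1
      refine ⟨I1, fun j => le_trans (I2 j) (hmono j), I3, ?_, ?_, I6, ?_, ?_, ?_, ?_⟩
      · intro y hy
        rcases List.mem_cons.mp hy with rfl | hy
        · exact le_trans (I2 (pvVIdx n y.2)) (le_of_eq hset)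
        · exact I4 y hy
      · exact fun p hp => I5 p (List.mem_cons_of_mem _ hp)
      · intro j hj
        have hj1 : j < (d.set (pvVIdx n x.2) (weight + x.1)).length := by
          rw [List.length_set]; exact hj
        rcases I7 j hj1 with he | hwit
        · by_cases hjx : pvVIdx n x.2 = j
          · subst hjx
            right
            exact ⟨(weight + x.1, x.2), I5 _ (List.mem_cons_self ..), rfl, by rw [he, hset]⟩
          · left
            rw [he, pvGetD_set_ne _ _ hjx]
        · exact Or.inr hwit
      · exact le_trans I8 (le_of_lt hsum1)
      · exact Or.inr (lt_of_le_of_lt I8 hsum1)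
      · have := I10
        simp only [List.length_cons] at this ⊢
        omega
    · rw [show pvDkStep n weight (pq0, d) x = (pq0, d) by unfold pvDkStep; rw [if_neg hc]]
      obtain ⟨I1, I2, I3, I4, I5, I6, I7, I8, I9, I10⟩ := ih pq0 d hadjtl hinv hcl hdc hPpq
      refine ⟨I1, I2, I3, ?_, I5, I6, I7, I8, I9, ?_⟩
      · intro y hy
        rcases List.mem_cons.mp hy with rfl | hy
        · exact le_trans (I2 (pvVIdx n y.2)) (by omega)
        · exact I4 y hy
      · simp only [List.length_cons]
        omega

theorem pvDijkLoop_good (n src : Int) (esr : List (Int × Int × Int))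
    (g : List (List (Int × Int))) (hn : 0 ≤ n) (hG : pvGWF n esr g) (hwf : pvRawWF n esr) :
    ∀ (fuel : Nat) (pq : List (Int × Int)) (d : List Int),
      pvInvA n src (esr.map (pvNormE n)) g pq d →
      pvSum d * (esr.length + 1) + pq.length < fuel →
      pvGood n src (esr.map (pvNormE n)) (pvDijkLoop n g fuel pq d) := by
  intro fuel
  induction fuel with
  | zero => intro pq d _ h; omega
  | succ k ih =>
    intro pq d hinvA hlt
    obtain ⟨hinv, hpq, hws⟩ := hinvA
    match pq, hlt, hpq, hws with
    | [], hlt, hpq, hws =>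
      rw [pvDijkLoop]
      refine ⟨hinv, ?_⟩
      intro eN heN
      obtain ⟨e, he, rfl⟩ := List.mem_map.mp heN
      have hcompl := hG.2.2.1 e he
      obtain ⟨w1, w2, w3, w4, w5⟩ := hwf e he
      have hi : pvVIdx n e.1 < d.length := by rw [hinv.1]; exact pvVIdx_lt n e.1 hn w1 w2
      rcases hws (pvVIdx n e.1) hi with ⟨p, hp, _, _⟩ | hstab
      · simp at hp
      · have := hstab (e.2.2, e.2.1) hcompl
        simpa [pvNormE] using this
    | x :: xs, hlt, hpq, hws =>
      rw [pvDijkLoop]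
      simp only
      have hm : pvHeapMin x xs ∈ x :: xs := pvHeapMin_mem x xs
      have hperm : (x :: xs).Perm (pvHeapMin x xs :: (x :: xs).erase (pvHeapMin x xs)) :=
        List.perm_cons_erase hm
      have hlenr : (x :: xs).length = ((x :: xs).erase (pvHeapMin x xs)).length + 1 := by
        rw [hperm.length_eq]; simp
      have hmemiff : ∀ p, p ∈ x :: xs ↔
          p = pvHeapMin x xs ∨ p ∈ (x :: xs).erase (pvHeapMin x xs) := by
        intro p; rw [hperm.mem_iff]; simp
      obtain ⟨hmn, hmle, hmpath⟩ := hpq (pvHeapMin x xs) hm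
      have hrestpq : ∀ p ∈ (x :: xs).erase (pvHeapMin x xs),
          pvPpq n src (esr.map (pvNormE n)) p d :=
        fun p hp => hpq p ((hmemiff p).mpr (Or.inr hp))
      by_cases hstale : d.getD (pvVIdx n (pvHeapMin x xs).2) 0 < (pvHeapMin x xs).1
      · rw [if_pos hstale]
        refine ih _ d ⟨hinv, hrestpq, ?_⟩ (by omega)
        intro i hi
        rcases hws i hi with ⟨p, hp, hp2, hp1⟩ | hstab
        · rcases (hmemiff p).mp hp with rfl | hpr
          · exfalso
            rw [hp2, hp1] at hstale
            exact absurd hstale (lt_irrefl _)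
          · exact Or.inl ⟨p, hpr, hp2, hp1⟩
        · exact Or.inr hstab
      · rw [if_neg hstale]
        have heq : d.getD (pvVIdx n (pvHeapMin x xs).2) 0 = (pvHeapMin x xs).1 :=
          le_antisymm hmle (not_lt.mp hstale)
        have hcl : pvVIdx n (pvHeapMin x xs).2 < d.length := by rw [hinv.1]; exact hmn
        have hadj : ∀ y ∈ g.getD (pvVIdx n (pvHeapMin x xs).2) [],
            pvVIdx n y.2 < (n+1).toNat ∧ 0 ≤ y.1 ∧
            (((pvVIdx n (pvHeapMin x xs).2 : Nat) : Int), ((pvVIdx n y.2 : Nat) : Int), y.1)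
              ∈ esr.map (pvNormE n) := by
          intro y hy
          exact hG.2.1 (pvVIdx n (pvHeapMin x xs).2) y hy
        obtain ⟨I1, I2, I3, I4, I5, I6, I7, I8, I9, I10⟩ :=
          pvDk_fold n src (pvHeapMin x xs).2 (pvHeapMin x xs).1 (esr.map (pvNormE n)) hn hmpath
            (g.getD (pvVIdx n (pvHeapMin x xs).2) []) ((x :: xs).erase (pvHeapMin x xs)) d
            hadj hinv hcl heq hrestpq
        have hlen2 : ((g.getD (pvVIdx n (pvHeapMin x xs).2) []).foldl
            (pvDkStep n (pvHeapMin x xs).1) ((x :: xs).erase (pvHeapMin x xs), d)).2.length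
            = d.length := by rw [I1.1, hinv.1]
        have hinvA' : pvInvA n src (esr.map (pvNormE n)) g
            ((g.getD (pvVIdx n (pvHeapMin x xs).2) []).foldl (pvDkStep n (pvHeapMin x xs).1)
              ((x :: xs).erase (pvHeapMin x xs), d)).1
            ((g.getD (pvVIdx n (pvHeapMin x xs).2) []).foldl (pvDkStep n (pvHeapMin x xs).1)
              ((x :: xs).erase (pvHeapMin x xs), d)).2 := by
          refine ⟨I1, I6, ?_⟩
          intro j hj
          rw [hlen2] at hj
          by_cases hjc : j = pvVIdx n (pvHeapMin x xs).2
          · subst hjc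
            right
            intro y hy
            rw [I3]
            exact I4 y hy
          · rcases I7 j hj with he | hwit
            · rcases hws j hj with ⟨p, hp, hp2, hp1⟩ | hstab
              · rcases (hmemiff p).mp hp with rfl | hpr
                · exact absurd hp2.symm hjc
                · exact Or.inl ⟨p, I5 p hpr, hp2, by rw [he, hp1]⟩
              · right
                intro y hy
                have := hstab y hy
                have h2 := I2 (pvVIdx n y.2)
                rw [he]
                omega
            · exact Or.inl hwit
        rcases I9 with heqst | hstrict
        · have e1 : ((g.getD (pvVIdx n (pvHeapMin x xs).2) []).foldl (pvDkStep n (pvHeapMin x xs).1)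
              ((x :: xs).erase (pvHeapMin x xs), d)).1 = (x :: xs).erase (pvHeapMin x xs) := by
            rw [heqst]
          have e2 : ((g.getD (pvVIdx n (pvHeapMin x xs).2) []).foldl (pvDkStep n (pvHeapMin x xs).1)
              ((x :: xs).erase (pvHeapMin x xs), d)).2 = d := by
            rw [heqst]
          rw [e1, e2] at hinvA' ⊢
          exact ih _ _ hinvA' (by omega)
        · have hadjlen : (g.getD (pvVIdx n (pvHeapMin x xs).2) []).length ≤ esr.length :=
            le_trans (pvGLen_getD g _) hG.2.2.2
          refine ih _ _ hinvA' ?_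
          have hmul : (pvSum ((g.getD (pvVIdx n (pvHeapMin x xs).2) []).foldl
              (pvDkStep n (pvHeapMin x xs).1) ((x :: xs).erase (pvHeapMin x xs), d)).2)
              * (esr.length + 1) + esr.length + 1 ≤ pvSum d * (esr.length + 1) := by
            calc _ = (pvSum ((g.getD (pvVIdx n (pvHeapMin x xs).2) []).foldl
                (pvDkStep n (pvHeapMin x xs).1) ((x :: xs).erase (pvHeapMin x xs), d)).2 + 1)
                * (esr.length + 1) := by ring
            _ ≤ pvSum d * (esr.length + 1) := Nat.mul_le_mul_right _ (by omega)
          omega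

theorem pvDijkstra_good (n src : Int) (fares : List (Int × Int × Int)) (hn : 0 ≤ n)
    (h0 : -(n+1) ≤ src) (h1 : src ≤ n)
    (hp : ∀ f ∈ fares, -(n+1) ≤ f.1 ∧ f.1 ≤ n ∧ -(n+1) ≤ f.2.1 ∧ f.2.1 ≤ n ∧ 0 ≤ f.2.2) :
    pvGood n ((pvVIdx n src : Nat) : Int) ((pvEdges fares).map (pvNormE n))
      (pvDijkstra (pvBuildGraph n fares) ((n+1).toNat * 2000000000 * (2 * fares.length + 1) + 2) n src) := by
  have hG := pvBuildGraph_wf n fares hn hp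
  have hwf := pvEdges_wf n fares hp
  have hinit := pvInit_inv n ((pvVIdx n src : Nat) : Int) ((pvEdges fares).map (pvNormE n)) hn
    (Int.natCast_nonneg _) (pvVIdx_le n src hn h0 h1)
  rw [Int.toNat_natCast] at hinit
  unfold pvDijkstra
  apply pvDijkLoop_good n _ (pvEdges fares) _ hn hG hwf
  · refine ⟨hinit, ?_, ?_⟩
    · intro p hp'
      rcases List.mem_cons.mp hp' with rfl | hp'
      · refine ⟨pvVIdx_lt n src hn h0 h1, le_of_eq hinit.2.1, ?_⟩
        have := pvPath.nil (es := (pvEdges fares).map (pvNormE n)) ((pvVIdx n src : Nat) : Int)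
        exact this
      · simp at hp'
    · intro i hi
      rw [hinit.1] at hi
      by_cases his : i = pvVIdx n src
      · left
        exact ⟨(0, src), List.mem_cons_self .., his.symm, by rw [his]; exact hinit.2.1.symm⟩
      · right
        intro y hy
        obtain ⟨q1, q2, _⟩ := hG.2.1 i y hy
        have hyl : pvVIdx n y.2 <
            ((List.replicate (n+1).toNat pvINF).set (pvVIdx n src) 0).length := by
          rw [hinit.1]; exact q1
        have hyb := (hinit.2.2.1 (pvVIdx n y.2) hyl).2
        have hii : ((List.replicate (n+1).toNat pvINF).set (pvVIdx n src) 0).getD i 0 = pvINF := by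
          rw [pvGetD_set_ne _ _ (fun h => his h.symm), pvGetD_replicate _ _ _ hi]
        rw [hii]
        omega
  · rw [pvEdges_length]
    have hS := pvInit_sum n src hn (pvVIdx n src)
    have := Nat.mul_le_mul_right (2 * fares.length + 1) hS
    simp only [List.length_cons, List.length_nil]
    omega

-- ===== VERDICT (by name: the statement is the Claim_ definition above) =====
theorem solution_spec : Claim_equal_solution := by
  intro n s a b fares _ hpre
  obtain ⟨hn, hs0, hs1, ha0, ha1, hb0, hb1, hp⟩ := hpre
  show solution n s a b fares = solution_alt n s a b fares
  have hwf := pvEdges_wf n fares hp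
  have hgs := pvDijkstra_good n s fares hn hs0 hs1 hp
  have hga := pvDijkstra_good n a fares hn ha0 ha1 hp
  have hgb := pvDijkstra_good n b fares hn hb0 hb1 hp
  have hbs := pvRelaxAll_good n s (pvEdges fares) hn hwf hs0 hs1
  have hba := pvRelaxAll_good n a (pvEdges fares) hn hwf ha0 ha1
  have hbb := pvRelaxAll_good n b (pvEdges fares) hn hwf hb0 hb1
  simp only [solution, solution_alt]
  rw [List.foldl_map]
  apply PySem.List.foldl_congr_mem
  intro acc i hi
  have hi' : i < (n+1).toNat := List.mem_range.mp hi
  rw [pvGood_unique n _ _ _ _ hgs hbs i hi', pvGood_unique n _ _ _ _ hga hba i hi',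
      pvGood_unique n _ _ _ _ hgb hbb i hi']
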